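-- pv_equiv track=rewrite | github.com/Morpheus5828/GraphMatching | graph_matching/utils/graph/graph_tools.py | get_in_between_perm_matrix
-- ===== SOURCE A (Python) =====
-- def get_in_between_perm_matrix(
--         perm_mat_1,
--         perm_mat_2
-- ) -> dict:
--     """
--     Given two permutation from noisy graphs to a reference graph,
--     Return the permutation matrix to go from one graph to the other
--     :param perm_mat_1:
--     :param perm_mat_2:
--     :return:
--     """
--     result_perm = {}
--     for i in range(len(perm_mat_1)):
--         if perm_mat_1[i] == -1:
--             continue
--         for j in range(len(perm_mat_2)):
--             if perm_mat_2[j] == -1: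
--                 continue
--
--             if perm_mat_1[i] == perm_mat_2[j]:
--                 result_perm[i] = j
--
--     return result_perm
-- ===== SOURCE B (Python) =====
-- def get_in_between_perm_matrix(perm_mat_1, perm_mat_2) -> dict:
--     last = {}
--     for j, v in enumerate(perm_mat_2):
--         if v != -1:
--             last[v] = j
--     result = {}
--     for i, v in enumerate(perm_mat_1):
--         if v != -1 and v in last:
--             result[i] = last[v]
--     return result
-- ===== Notes on version B (the rewrite author's own statement) =====
-- stated objective: faster
-- what changed: Replaced A's nested index loops (rescanning all of perm_mat_2 for every entry of perm_mat_1) by two single passes: one pass over perm_mat_2 builds a dict mapping each non-(-1) value to its last index, then one pass over perm_mat_1 looks each value up in that dict.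
import Mathlib
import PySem

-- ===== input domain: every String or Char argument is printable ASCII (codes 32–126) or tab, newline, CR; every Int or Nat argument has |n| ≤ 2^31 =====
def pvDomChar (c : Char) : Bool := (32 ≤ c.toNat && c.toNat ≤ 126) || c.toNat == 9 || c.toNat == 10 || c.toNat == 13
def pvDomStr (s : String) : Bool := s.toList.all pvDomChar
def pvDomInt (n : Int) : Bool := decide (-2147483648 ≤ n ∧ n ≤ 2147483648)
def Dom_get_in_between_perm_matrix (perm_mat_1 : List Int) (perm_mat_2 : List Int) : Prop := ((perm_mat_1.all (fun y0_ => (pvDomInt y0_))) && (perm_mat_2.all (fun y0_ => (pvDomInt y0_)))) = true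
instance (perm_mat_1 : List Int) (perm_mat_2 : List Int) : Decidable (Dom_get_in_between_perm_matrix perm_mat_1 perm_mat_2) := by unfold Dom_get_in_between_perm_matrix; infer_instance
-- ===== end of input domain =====

-- B replaces A's quadratic nested index loops by two single passes: a last-index dict over
-- perm_mat_2, then one scan of perm_mat_1 looking the value up (objective: faster, O(n·m) → O(n+m)).

-- ===== PORT A =====
def get_in_between_perm_matrix (perm_mat_1 : List Int) (perm_mat_2 : List Int) : List (Int × Int) :=
  ((PySem.List.pyRange 0 (perm_mat_1.length : Int) 1).foldl (fun result_perm i =>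
    if PySem.List.pyGetD perm_mat_1 i 0 == -1 then result_perm
    else
      (PySem.List.pyRange 0 (perm_mat_2.length : Int) 1).foldl (fun result_perm j =>
        if PySem.List.pyGetD perm_mat_2 j 0 == -1 then result_perm
        else if PySem.List.pyGetD perm_mat_1 i 0 == PySem.List.pyGetD perm_mat_2 j 0 then
          result_perm.insert i j
        else result_perm) result_perm) (PySem.Dict.empty : PySem.Dict Int Int)).items

-- ===== PORT B =====
-- `last[v]` under the guard `v in last` is ported as `getD v 0` (exact: the key is present).
def get_in_between_perm_matrix_alt (perm_mat_1 : List Int) (perm_mat_2 : List Int) : List (Int × Int) :=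
  let last := (PySem.List.enumerate perm_mat_2 0).foldl
      (fun d jv => if jv.2 == -1 then d else d.insert jv.2 jv.1) (PySem.Dict.empty : PySem.Dict Int Int)
  ((PySem.List.enumerate perm_mat_1 0).foldl
      (fun result iv =>
        if iv.2 != -1 && last.contains iv.2 then result.insert iv.1 (last.getD iv.2 0)
        else result) (PySem.Dict.empty : PySem.Dict Int Int)).items

-- ===== PRECONDITION & SPEC =====
def Spec_get_in_between_perm_matrix (perm_mat_1 : List Int) (perm_mat_2 : List Int) (out : List (Int × Int)) : Prop := out = get_in_between_perm_matrix_alt perm_mat_1 perm_mat_2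
instance (perm_mat_1 : List Int) (perm_mat_2 : List Int) (out : List (Int × Int)) : Decidable (Spec_get_in_between_perm_matrix perm_mat_1 perm_mat_2 out) := by unfold Spec_get_in_between_perm_matrix; infer_instance

-- ===== CLAIM (what is proved, stated in full; the proofs are below) =====
def Claim_equal_get_in_between_perm_matrix : Prop := ∀ (perm_mat_1 : List Int) (perm_mat_2 : List Int), Dom_get_in_between_perm_matrix perm_mat_1 perm_mat_2 → Spec_get_in_between_perm_matrix perm_mat_1 perm_mat_2 (get_in_between_perm_matrix perm_mat_1 perm_mat_2)

-- ===== LEMMAS AND PROOFS =====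

/-- Index (from offset `s`) of the LAST element of `p2` equal to `v` and different from `-1`. -/
def lastIdxFrom : List Int → Int → Int → Option Int
  | [], _, _ => none
  | w :: t, s, v =>
    match lastIdxFrom t (s + 1) v with
    | some j => some j
    | none => if w ≠ -1 ∧ w = v then some s else none

/-- B's `last` dict looks up the last matching index. -/
theorem lastD_get? (p2 : List Int) (s v : Int) (d0 : PySem.Dict Int Int) :
    ((PySem.List.enumerate p2 s).foldl
        (fun d jv => if jv.2 == -1 then d else d.insert jv.2 jv.1) d0).get? v
      = match lastIdxFrom p2 s v with
        | some j => some j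
        | none => d0.get? v := by
  induction p2 generalizing s d0 with
  | nil => simp [PySem.List.enumerate_nil, lastIdxFrom]
  | cons w t ih =>
    rw [PySem.List.enumerate_cons, List.foldl_cons]
    simp only [lastIdxFrom]
    rw [ih]
    cases h : lastIdxFrom t (s + 1) v with
    | some j => simp
    | none =>
      by_cases hw : w = -1
      · simp [hw]
      · by_cases hv : w = v
        · subst hv
          simp [hw, PySem.Dict.get?_insert_self]
        · have hvw : v ≠ w := fun h => hv h.symm
          simp [hw, hv, PySem.Dict.get?_insert, hvw]

/-- A's inner loop over `perm_mat_2` for a fixed key `i` and value `v`. -/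
theorem innerA (p2 : List Int) (s : Int) (res : PySem.Dict Int Int) (i v : Int) :
    (PySem.List.enumerate p2 s).foldl
        (fun r jw => if jw.2 == -1 then r
          else if v == jw.2 then r.insert i jw.1 else r) res
      = match lastIdxFrom p2 s v with
        | some j => res.insert i j
        | none => res := by
  induction p2 generalizing s res with
  | nil => simp [PySem.List.enumerate_nil, lastIdxFrom]
  | cons w t ih =>
    rw [PySem.List.enumerate_cons, List.foldl_cons]
    simp only [lastIdxFrom]
    by_cases hw : w = -1
    · subst hw
      rw [show (if (((-1 : Int) == -1) = true) then res
            else if ((v == (-1 : Int)) = true) then res.insert i s else res) = res from by simp,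
          ih]
      cases lastIdxFrom t (s + 1) v <;> simp
    · by_cases hv : v = w
      · subst hv
        rw [show (if ((v == (-1 : Int)) = true) then res
              else if ((v == v) = true) then res.insert i s else res) = res.insert i s from by
            simp [hw], ih]
        cases lastIdxFrom t (s + 1) v <;>
          simp [hw, PySem.Dict.insert_insert_self]
      · have hwv : ¬ w = v := fun h => hv h.symm
        rw [show (if ((w == (-1 : Int)) = true) then res
              else if ((v == w) = true) then res.insert i s else res) = res from by
            simp [hw, hv], ih]
        cases lastIdxFrom t (s + 1) v <;> simp [hw, hwv]

-- ===== VERDICT (by name: the statement is the Claim_ definition above) =====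
theorem get_in_between_perm_matrix_spec : Claim_equal_get_in_between_perm_matrix := by
  intro p1 p2 _
  show get_in_between_perm_matrix p1 p2 = get_in_between_perm_matrix_alt p1 p2
  have hA : get_in_between_perm_matrix p1 p2
      = ((PySem.List.enumerate p1 0).foldl (fun r p =>
          if p.2 == -1 then r
          else (PySem.List.enumerate p2 0).foldl (fun r2 q =>
            if q.2 == -1 then r2
            else if p.2 == q.2 then r2.insert p.1 q.1 else r2) r)
          (PySem.Dict.empty : PySem.Dict Int Int)).items := by
    unfold get_in_between_perm_matrix
    rw [PySem.List.enumerate_eq_map_pyRange (d := 0) (xs := p1),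
        PySem.List.enumerate_eq_map_pyRange (d := 0) (xs := p2),
        List.foldl_map]
    simp only [List.foldl_map, PySem.List.len_eq]
  rw [hA]
  unfold get_in_between_perm_matrix_alt
  have hstep : ∀ (r : PySem.Dict Int Int) (p : Int × Int),
      (if p.2 == -1 then r
        else (PySem.List.enumerate p2 0).foldl (fun r2 q =>
          if q.2 == -1 then r2
          else if p.2 == q.2 then r2.insert p.1 q.1 else r2) r)
      = (if p.2 != -1 &&
            ((PySem.List.enumerate p2 0).foldl
              (fun d jv => if jv.2 == -1 then d else d.insert jv.2 jv.1)
              (PySem.Dict.empty : PySem.Dict Int Int)).contains p.2 then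
          r.insert p.1
            (((PySem.List.enumerate p2 0).foldl
              (fun d jv => if jv.2 == -1 then d else d.insert jv.2 jv.1)
              (PySem.Dict.empty : PySem.Dict Int Int)).getD p.2 0)
        else r) := by
    intro r p
    by_cases hp : p.2 = -1
    · simp [hp]
    · rw [if_neg (by simp [hp]), innerA]
      rw [PySem.Dict.contains_eq_isSome_get?, PySem.Dict.getD_eq_get?_getD,
          lastD_get? p2 0 p.2, PySem.Dict.get?_empty]
      cases lastIdxFrom p2 0 p.2 <;> simp [hp]
  rw [funext (fun r => funext (hstep r))]
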